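-- pv_equiv track=rewrite | github.com/shivam3164/kundali2 | backend/features/transits/latta.py | get_nakshatra_index
-- ===== SOURCE A (Python) =====
-- NAKSHATRA_LIST = [
--     "Ashwini", "Bharani", "Krittika", "Rohini", "Mrigashira", "Ardra",
--     "Punarvasu", "Pushya", "Ashlesha", "Magha", "Purva Phalguni", "Uttara Phalguni",
--     "Hasta", "Chitra", "Swati", "Vishakha", "Anuradha", "Jyeshtha",
--     "Mula", "Purva Ashadha", "Uttara Ashadha", "Shravana", "Dhanishtha",
--     "Shatabhisha", "Purva Bhadrapada", "Uttara Bhadrapada", "Revati"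
-- ]
--
-- def get_nakshatra_index(name: str) -> int:
--     """Get 1-based index from nakshatra name"""
--     try:
--         return NAKSHATRA_LIST.index(name) + 1
--     except ValueError:
--         for i, nak in enumerate(NAKSHATRA_LIST):
--             if name.lower() in nak.lower() or nak.lower() in name.lower():
--                 return i + 1
--         return 0
-- ===== SOURCE B (Python) =====
-- NAKSHATRA_LIST = [
--     "Ashwini", "Bharani", "Krittika", "Rohini", "Mrigashira", "Ardra",
--     "Punarvasu", "Pushya", "Ashlesha", "Magha", "Purva Phalguni", "Uttara Phalguni",
--     "Hasta", "Chitra", "Swati", "Vishakha", "Anuradha", "Jyeshtha",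
--     "Mula", "Purva Ashadha", "Uttara Ashadha", "Shravana", "Dhanishtha",
--     "Shatabhisha", "Purva Bhadrapada", "Uttara Bhadrapada", "Revati"
-- ]
--
-- def get_nakshatra_index(name: str) -> int:
--     """Get 1-based index from nakshatra name (single pass with fuzzy fallback)."""
--     fuzzy = None
--     nl = name.lower()
--     for i, nak in enumerate(NAKSHATRA_LIST):
--         if name == nak:
--             return i + 1
--         if fuzzy is None:
--             kl = nak.lower()
--             if nl in kl or kl in nl:
--                 fuzzy = i
--     return fuzzy + 1 if fuzzy is not None else 0
-- ===== Notes on version B (the rewrite author's own statement) =====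
-- stated objective: faster
-- what changed: Replaces the two-pass try/except design (list.index exact pass, then a separate fuzzy enumerate pass) by a single loop that returns immediately on an exact match while recording the first fuzzy candidate as a fallback, so the list and the lowercasing work are done at most once.
import Mathlib
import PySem

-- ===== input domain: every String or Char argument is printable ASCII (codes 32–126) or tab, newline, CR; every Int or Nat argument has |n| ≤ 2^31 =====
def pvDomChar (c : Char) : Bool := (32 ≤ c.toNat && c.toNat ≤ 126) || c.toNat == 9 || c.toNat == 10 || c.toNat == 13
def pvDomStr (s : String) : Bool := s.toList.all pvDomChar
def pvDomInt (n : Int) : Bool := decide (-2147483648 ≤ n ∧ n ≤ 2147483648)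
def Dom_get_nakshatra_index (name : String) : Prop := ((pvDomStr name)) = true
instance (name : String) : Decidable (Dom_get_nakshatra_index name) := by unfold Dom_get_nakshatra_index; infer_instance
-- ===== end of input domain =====

-- One honest line: B folds A's exact pass (list.index) and fuzzy pass into a single
-- loop with a recorded first fuzzy candidate; same result, alternative decomposition.

def nakshatraList : List String := [
  "Ashwini", "Bharani", "Krittika", "Rohini", "Mrigashira", "Ardra",
  "Punarvasu", "Pushya", "Ashlesha", "Magha", "Purva Phalguni", "Uttara Phalguni",
  "Hasta", "Chitra", "Swati", "Vishakha", "Anuradha", "Jyeshtha",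
  "Mula", "Purva Ashadha", "Uttara Ashadha", "Shravana", "Dhanishtha",
  "Shatabhisha", "Purva Bhadrapada", "Uttara Bhadrapada", "Revati"]

-- the fuzzy condition shared by both programs: name.lower() in nak.lower() or nak.lower() in name.lower()
def pvFuzzy (name nak : String) : Bool :=
  PySem.Str.isIn (PySem.Str.lower name) (PySem.Str.lower nak) ||
  PySem.Str.isIn (PySem.Str.lower nak) (PySem.Str.lower name)

-- ===== PORT A =====
-- A's except-branch: 'for i, nak in enumerate(...): if fuzzy: return i+1' then 'return 0'
def pvFuzzLoopA (name : String) : List (Int × String) → Int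
  | [] => 0
  | (i, nak) :: rest => if pvFuzzy name nak then i + 1 else pvFuzzLoopA name rest

def get_nakshatra_index (name : String) : Int :=
  match PySem.List.index? nakshatraList name with   -- try: NAKSHATRA_LIST.index(name) + 1
  | some j => (j : Int) + 1
  | none => pvFuzzLoopA name (PySem.List.enumerate nakshatraList 0)   -- except ValueError

-- ===== PORT B =====
-- single pass: exact match returns at once; first fuzzy candidate kept as fallback
def pvGoB (name : String) : List String → Int → Option Int → Int
  | [], _, some f => f + 1
  | [], _, none => 0
  | nak :: rest, i, fz =>
      if name == nak then i + 1
      else pvGoB name rest (i + 1)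
        (if fz.isNone && pvFuzzy name nak then some i else fz)

def get_nakshatra_index_alt (name : String) : Int :=
  pvGoB name nakshatraList 0 none

-- ===== PRECONDITION & SPEC =====
def Spec_get_nakshatra_index (name : String) (out : Int) : Prop := out = get_nakshatra_index_alt name
instance (name : String) (out : Int) : Decidable (Spec_get_nakshatra_index name out) := by unfold Spec_get_nakshatra_index; infer_instance

-- ===== CLAIM (what is proved, stated in full; the proofs are below) =====
def Claim_equal_get_nakshatra_index : Prop := ∀ (name : String), Dom_get_nakshatra_index name → Spec_get_nakshatra_index name (get_nakshatra_index name)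

-- ===== LEMMAS AND PROOFS =====

-- B's loop, characterised: exact match (relative index j) wins with i+j+1; otherwise a
-- recorded candidate f gives f+1; otherwise A's fuzzy scan of the remaining suffix decides.
theorem pvGoB_eq (name : String) : ∀ (l : List String) (i : Int) (fz : Option Int),
    pvGoB name l i fz =
      match PySem.List.index? l name with
      | some j => i + (j : Int) + 1
      | none =>
        match fz with
        | some f => f + 1
        | none => pvFuzzLoopA name (PySem.List.enumerate l i) := by
  intro l
  induction l with
  | nil =>
      intro i fz
      cases fz <;> simp [pvGoB, pvFuzzLoopA, PySem.List.index?_eq_idxOf?, List.idxOf?]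
  | cons nak rest ih =>
      intro i fz
      by_cases hx : name = nak
      · subst hx
        rw [show PySem.List.index? (name :: rest) name = some 0 from
              PySem.List.index?_cons_self name rest]
        simp [pvGoB]
      · rw [PySem.List.index?_cons_of_ne rest (Ne.symm hx)]
        simp only [pvGoB, beq_iff_eq, hx, if_false]
        rw [ih (i + 1) _]
        cases hidx : PySem.List.index? rest name with
        | some j =>
            simp only [Option.map_some]
            push_cast
            ring
        | none =>
            simp only [Option.map_none]
            cases fz with
            | some f => simp
            | none =>
                rw [PySem.List.enumerate_cons]
                by_cases hc : pvFuzzy name nak = true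
                · simp [pvFuzzLoopA, hc]
                · simp [pvFuzzLoopA, hc]

-- ===== VERDICT (by name: the statement is the Claim_ definition above) =====
theorem get_nakshatra_index_spec : Claim_equal_get_nakshatra_index := by
  intro name _
  unfold Spec_get_nakshatra_index get_nakshatra_index get_nakshatra_index_alt
  rw [pvGoB_eq]
  cases PySem.List.index? nakshatraList name with
  | some j => simp
  | none => rfl
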